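-- pv_equiv track=rewrite | github.com/uio-bmi/numpy_alignments | numpy_alignments/numpy_alignments.py | encode_chromosome
-- ===== SOURCE A (Python) =====
-- def encode_chromosome(chromosome):
--     if chromosome.startswith("chr"):
--         return encode_chromosome(chromosome.replace("chr", ""))
--
--     if chromosome == "X":
--         chromosome = 23
--     elif chromosome == "Y":
--         chromosome = 24
--     elif chromosome == "*":
--         # Read couldn't map, ignore
--         return -1
--     else:
--         chromosome = int(chromosome)
--
--     return chromosome
-- ===== SOURCE B (Python) =====
-- _MAPPING = {"X": 23, "Y": 24, "*": -1}
--
--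
-- def encode_chromosome(chromosome):
--     while chromosome.startswith("chr"):
--         chromosome = chromosome.replace("chr", "")
--     if chromosome in _MAPPING:
--         return _MAPPING[chromosome]
--     return int(chromosome)
-- ===== Notes on version B (the rewrite author's own statement) =====
-- stated objective: idiomatic
-- what changed: The tail recursion that strips leading 'chr' (via replace-all) is replaced by an explicit while loop, and the X/Y/* if-elif chain by a single dict lookup with an int() fallback.
-- outside the precondition, e.g. on encode_chromosome('1q'): A raises ValueError, B raises ValueError
import Mathlib
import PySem

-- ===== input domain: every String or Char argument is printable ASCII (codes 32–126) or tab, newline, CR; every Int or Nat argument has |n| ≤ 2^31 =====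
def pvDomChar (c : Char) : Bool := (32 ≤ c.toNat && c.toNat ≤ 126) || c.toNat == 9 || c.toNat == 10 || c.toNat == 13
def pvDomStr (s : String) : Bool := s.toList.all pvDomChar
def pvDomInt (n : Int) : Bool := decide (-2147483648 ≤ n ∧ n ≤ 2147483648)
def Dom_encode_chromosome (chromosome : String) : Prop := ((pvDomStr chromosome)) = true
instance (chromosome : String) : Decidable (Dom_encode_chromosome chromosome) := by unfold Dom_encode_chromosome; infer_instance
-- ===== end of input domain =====

-- B replaces A's tail recursion by an explicit strip loop followed by one table lookup
-- (dict {"X":23,"Y":24,"*":-1}) with an int() fallback; same return value, idiomatic decomposition.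

-- termination helper (cited by both recursive defs): a replace-all of "chr" on a string
-- starting with "chr" strictly shortens it
theorem pv_go_len_le (old : List Char) (fuel : Nat) (l acc : List Char) :
    (PySem.Chars.replace.go old [] fuel l acc).length ≤ acc.length + l.length := by
  induction fuel generalizing l acc with
  | zero => simp [PySem.Chars.replace.go]
  | succ n ih =>
    cases l with
    | nil => simp [PySem.Chars.replace.go]
    | cons c t =>
      rw [PySem.Chars.replace.go]
      split
      · have h1 := ih (List.drop old.length (c :: t)) acc
        simp only [List.reverse_nil, List.nil_append, List.length_cons, List.length_drop] at h1 ⊢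
        omega
      · have h1 := ih t (c :: acc)
        simp only [List.length_cons] at h1 ⊢
        omega

theorem pv_replace_len_lt (s : String) (h : PySem.Str.startswith s "chr" = true) :
    (PySem.Str.replace s "chr" "").toList.length < s.toList.length := by
  rw [PySem.Str.toList_replace]
  have hpre : "chr".toList.isPrefixOf s.toList = true := h
  have hlen : 3 ≤ s.toList.length := by
    have := List.IsPrefix.length_le (List.isPrefixOf_iff_prefix.mp hpre)
    simpa using this
  obtain ⟨c, t, hct⟩ : ∃ c t, s.toList = c :: t := by
    cases hs : s.toList with
    | nil => rw [hs] at hlen; simp at hlen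
    | cons c t => exact ⟨c, t, rfl⟩
  rw [PySem.Chars.replace]
  simp only [List.isEmpty_iff]
  rw [if_neg (by simp)]
  have hfuel : s.toList.length = (s.toList.length - 1) + 1 := by omega
  rw [hct] at hpre ⊢
  rw [hct] at hfuel
  rw [hfuel, PySem.Chars.replace.go]
  rw [if_pos hpre]
  have h1 := pv_go_len_le "chr".toList ((c :: t).length - 1) (List.drop "chr".toList.length (c :: t)) ([].reverse ++ [])
  have hf : ("chr".toList).length = 3 := by decide
  simp only [String.toList_empty, List.reverse_nil, List.nil_append, List.length_cons,
    List.length_drop, List.length_nil, hf] at h1 ⊢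
  rw [hct] at hlen; simp only [List.length_cons] at hlen
  omega

-- ===== PORT A =====
def encode_chromosome (chromosome : String) : Int :=
  if h : PySem.Str.startswith chromosome "chr" = true then
    encode_chromosome (PySem.Str.replace chromosome "chr" "")
  else if chromosome = "X" then 23
  else if chromosome = "Y" then 24
  else if chromosome = "*" then -1
  else (PySem.Int.ofStr? chromosome).getD 0  -- int(chromosome); none (ValueError) excluded by Pre_
termination_by chromosome.toList.length
decreasing_by exact pv_replace_len_lt _ h

-- ===== PORT B =====
-- the while loop of Source B: while chromosome.startswith("chr"): chromosome = chromosome.replace("chr","")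
-- (the Nat argument only bounds the number of passes for totality: each pass shortens the
-- string, so s.toList.length passes always suffice and the bound is never hit)
def strip_chr_go : Nat → String → String
  | 0, s => s
  | n + 1, s => if PySem.Str.startswith s "chr" = true then strip_chr_go n (PySem.Str.replace s "chr" "") else s

def strip_chr (s : String) : String := strip_chr_go s.toList.length s

-- _MAPPING = {"X": 23, "Y": 24, "*": -1}
def pvMapping : PySem.Dict String Int := PySem.Dict.mk [("X", 23), ("Y", 24), ("*", -1)]

def encode_chromosome_alt (chromosome : String) : Int :=
  let c := strip_chr chromosome
  match PySem.Dict.get? pvMapping c with   -- if c in _MAPPING: return _MAPPING[c]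
  | some v => v
  | none => (PySem.Int.ofStr? c).getD 0    -- int(c); none (ValueError) excluded by Pre_

-- ===== PRECONDITION & SPEC =====
-- Pre_ excludes exactly the inputs where A raises ValueError: after the "chr"-stripping the
-- remaining string is neither "X"/"Y"/"*" nor accepted by int().  The stripped normal form is
-- stated declaratively as the length-th iterate of the single strip step (the step is the
-- identity once the string no longer starts with "chr", so the iterate is the loop's fixpoint).
def pvStripStep (s : String) : String :=
  if PySem.Str.startswith s "chr" = true then PySem.Str.replace s "chr" "" else s
def pvStripped (s : String) : String := pvStripStep^[s.toList.length] s
def Pre_encode_chromosome (chromosome : String) : Prop :=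
  pvStripped chromosome = "X" ∨ pvStripped chromosome = "Y" ∨ pvStripped chromosome = "*" ∨
    (PySem.Int.ofStr? (pvStripped chromosome)).isSome = true
instance (chromosome : String) : Decidable (Pre_encode_chromosome chromosome) := by
  unfold Pre_encode_chromosome; infer_instance
def pvWitness_encode_chromosome : String := "chrX"

def Spec_encode_chromosome (chromosome : String) (out : Int) : Prop := out = encode_chromosome_alt chromosome
instance (chromosome : String) (out : Int) : Decidable (Spec_encode_chromosome chromosome out) := by unfold Spec_encode_chromosome; infer_instance

-- ===== CLAIM (what is proved, stated in full; the proofs are below) =====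
def Claim_equal_encode_chromosome : Prop := ∀ (chromosome : String), Dom_encode_chromosome chromosome → Pre_encode_chromosome chromosome → Spec_encode_chromosome chromosome (encode_chromosome chromosome)

-- ===== LEMMAS AND PROOFS =====
theorem pv_short_not_start (s : String) (h : s.toList.length < 3) :
    PySem.Str.startswith s "chr" = false := by
  by_contra hc
  have hp : "chr".toList.isPrefixOf s.toList = true := (Bool.not_eq_false _).mp hc
  have hle := List.IsPrefix.length_le (List.isPrefixOf_iff_prefix.mp hp)
  have h3 : ("chr".toList).length = 3 := by decide
  omega

theorem pv_go_congr (fuel : Nat) : ∀ (fuel' : Nat) (s : String),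
    s.toList.length ≤ fuel → s.toList.length ≤ fuel' →
    strip_chr_go fuel s = strip_chr_go fuel' s := by
  induction fuel with
  | zero =>
    intro fuel' s h h'
    have hz : s.toList.length = 0 := by omega
    have hns := pv_short_not_start s (by omega)
    have hns' : ¬ (PySem.Str.startswith s "chr" = true) := by
      intro hh; rw [hh] at hns; exact Bool.true_eq_false.mp hns
    cases fuel' with
    | zero => rfl
    | succ m =>
      conv_rhs => rw [strip_chr_go, if_neg hns']
      rfl
  | succ n ih =>
    intro fuel' s h h'
    cases fuel' with
    | zero =>
      have hns := pv_short_not_start s (by omega)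
      have hns' : ¬ (PySem.Str.startswith s "chr" = true) := by
        intro hh; rw [hh] at hns; exact Bool.true_eq_false.mp hns
      conv_lhs => rw [strip_chr_go, if_neg hns']
      rfl
    | succ m =>
      by_cases hs : PySem.Str.startswith s "chr" = true
      · have hlt := pv_replace_len_lt s hs
        rw [strip_chr_go, strip_chr_go, if_pos hs, if_pos hs]
        exact ih m (PySem.Str.replace s "chr" "") (by omega) (by omega)
      · rw [strip_chr_go, strip_chr_go, if_neg hs, if_neg hs]

theorem pv_strip_step (s : String) (h : PySem.Str.startswith s "chr" = true) :
    strip_chr s = strip_chr (PySem.Str.replace s "chr" "") := by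
  have hlt := pv_replace_len_lt s h
  unfold strip_chr
  obtain ⟨k, hk⟩ : ∃ k, s.toList.length = k + 1 := ⟨s.toList.length - 1, by omega⟩
  rw [hk, strip_chr_go, if_pos h]
  exact pv_go_congr k _ (PySem.Str.replace s "chr" "") (by omega) le_rfl

theorem pv_strip_fix (s : String) (h : ¬ PySem.Str.startswith s "chr" = true) :
    strip_chr s = s := by
  unfold strip_chr
  cases hL : s.toList.length with
  | zero => rfl
  | succ k => rw [strip_chr_go, if_neg h]
theorem pv_encode_eq (s : String) : encode_chromosome s = encode_chromosome_alt s := by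
  rw [encode_chromosome]
  by_cases h : PySem.Str.startswith s "chr" = true
  · rw [dif_pos h, pv_encode_eq (PySem.Str.replace s "chr" "")]
    unfold encode_chromosome_alt
    rw [pv_strip_step s h]
  · rw [dif_neg h]
    have hs : strip_chr s = s := pv_strip_fix s h
    unfold encode_chromosome_alt
    rw [hs]
    by_cases h1 : s = "X"
    · subst h1; decide
    by_cases h2 : s = "Y"
    · subst h2; decide
    by_cases h3 : s = "*"
    · subst h3; decide
    rw [if_neg h1, if_neg h2, if_neg h3]
    have hget : PySem.Dict.get? pvMapping s = none := by
      simp only [pvMapping, PySem.Dict.get?_mk_cons, beq_iff_eq]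
      rw [if_neg (fun e => h1 e.symm), if_neg (fun e => h2 e.symm), if_neg (fun e => h3 e.symm)]
      rfl
    simp only [hget]
termination_by s.toList.length
decreasing_by exact pv_replace_len_lt _ h

-- ===== VERDICT (by name: the statement is the Claim_ definition above) =====
theorem encode_chromosome_spec : Claim_equal_encode_chromosome := by
  intro chromosome _ _
  exact pv_encode_eq chromosome
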